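-- pv_equiv track=rewrite | github.com/Algorithm-bbackgongdan/Almut-2nd | code/itsnowkim/week2/prog_150367.py | solution
-- ===== SOURCE A (Python) =====
-- def makeBinaryNumber(number):
--     reverseBinaryNumber = []
--     while number != 1:
--         reverseBinaryNumber.append(str(number % 2))
--         number //= 2
--     reverseBinaryNumber.append("1")
--     binaryNumber = ''.join(reverseBinaryNumber[::-1])
--     binaryTreeSize = 1
--     while binaryTreeSize < len(binaryNumber):
--         binaryTreeSize = (binaryTreeSize + 1) * 2 - 1
--     binaryNumber = "0" * (binaryTreeSize - len(binaryNumber)) + binaryNumber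
--     return binaryNumber
--
-- def checkPossible(start, end, binaryString):
--     if start == end:
--         return binaryString[start]
--     mid = (start + end) // 2
--     left = checkPossible(start, mid-1, binaryString)
--     if not left or (binaryString[mid] == "0" and left == "1"): return False
--     right = checkPossible(mid+1, end, binaryString)
--     if not right or (binaryString[mid] == "0" and right == "1"): return False
--     if left == "0" and right == "0" and binaryString[mid] == "0": return "0"
--     return "1"
--
-- def solution(numbers):
--     answer = []
--     for number in numbers:
--         binaryNumber = makeBinaryNumber(number)
--         if checkPossible(0, len(binaryNumber)-1, binaryNumber):
--             answer.append(1)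
--         else:
--             answer.append(0)
--     return answer
-- ===== SOURCE B (Python) =====
-- def validTree(s):
--     # s is a perfect-binary-tree string in in-order layout
--     if len(s) <= 1:
--         return True
--     mid = len(s) // 2
--     if s[mid] == "1":
--         return validTree(s[:mid]) and validTree(s[mid + 1:])
--     return "1" not in s
--
--
-- def solution(numbers):
--     answer = []
--     for number in numbers:
--         bits = bin(number)[2:]
--         size = (1 << len(bits).bit_length()) - 1
--         padded = "0" * (size - len(bits)) + bits
--         answer.append(1 if validTree(padded) else 0)
--     return answer
-- ===== Notes on version B (the rewrite author's own statement) =====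
-- stated objective: simpler
-- what changed: B replaces A's hand-rolled bit loop and tree-size loop by bin()/bit_length() closed forms, and replaces checkPossible's tri-state ('0'/'1'/False) index-pair recursion over the whole string by a boolean validator on string slices that short-circuits a '0'-rooted subtree to a plain "no '1' in the substring" scan.
import Mathlib
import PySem

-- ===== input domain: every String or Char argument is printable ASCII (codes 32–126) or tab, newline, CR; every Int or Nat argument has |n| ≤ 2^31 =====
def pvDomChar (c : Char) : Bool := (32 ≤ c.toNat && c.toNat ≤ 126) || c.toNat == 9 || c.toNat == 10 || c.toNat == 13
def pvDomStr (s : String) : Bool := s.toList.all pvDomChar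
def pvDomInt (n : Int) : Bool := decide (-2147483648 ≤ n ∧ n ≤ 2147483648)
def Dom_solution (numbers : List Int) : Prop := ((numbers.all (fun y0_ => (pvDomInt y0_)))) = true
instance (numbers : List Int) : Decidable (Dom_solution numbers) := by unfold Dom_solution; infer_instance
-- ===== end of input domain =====

-- B replaces A's tri-state ("0"/"1"/False) index-pair recursion by a boolean validator on
-- string slices that short-circuits a '0'-root to a plain substring scan (objective: simpler).

-- ===== PORT A =====
-- while number != 1: append str(number % 2); number //= 2   (fuel is only a totality guard;
-- it is enough for every number ≥ 1; for number ≤ 0 Python loops forever — excluded by Pre_)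
def mbLoop : Nat → Int → List String → List String
  | 0, _, acc => acc
  | fuel+1, n, acc =>
    if n ≠ 1 then mbLoop fuel (PySem.Int.floordiv n 2) (acc ++ [PySem.Int.toStr (PySem.Int.mod n 2)])
    else acc

-- while binaryTreeSize < len(binaryNumber): binaryTreeSize = (binaryTreeSize + 1) * 2 - 1
def padLoop : Nat → Int → Int → Int
  | 0, sz, _ => sz
  | fuel+1, sz, len => if sz < len then padLoop fuel ((sz + 1) * 2 - 1) len else sz

def makeBinaryNumber (number : Int) : List Char :=
  let rev := mbLoop (number.natAbs + 1) number [] ++ ["1"]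
  -- ''.join(rev[::-1])
  let bn := (((PySem.List.slice? rev none none (-1)).getD []).map String.toList).flatten
  let sz := padLoop (bn.length + 1) 1 (bn.length : Int)
  -- "0" * (binaryTreeSize - len(binaryNumber)) + binaryNumber
  List.replicate (sz - (bn.length : Int)).toNat '0' ++ bn

-- checkPossible; result: none = False, some c = the 1-char string c.  pyGet? is s[i]
-- (never out of range on the calls solution makes).  fuel is a totality guard only.
def cp : Nat → Int → Int → List Char → Option Char
  | 0, _, _, _ => none
  | fuel+1, start, e, s =>
    if start = e then PySem.List.pyGet? s start
    else
      let mid := PySem.Int.floordiv (start + e) 2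
      match cp fuel start (mid - 1) s with
      | none => none
      | some l =>
        if PySem.List.pyGet? s mid = some '0' ∧ l = '1' then none
        else
          match cp fuel (mid + 1) e s with
          | none => none
          | some r =>
            if PySem.List.pyGet? s mid = some '0' ∧ r = '1' then none
            else if l = '0' ∧ r = '0' ∧ PySem.List.pyGet? s mid = some '0' then some '0'
            else some '1'

def solution (numbers : List Int) : List Int :=
  numbers.foldl (fun answer number =>
    let bn := makeBinaryNumber number
    answer ++ [if (cp (bn.length + 1) 0 ((bn.length : Int) - 1) bn).isSome then 1 else 0]) []

-- ===== PORT B =====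
-- bin(number)[2:], hand-ported (exact for number ≥ 1; fuel is only a totality guard)
def binCharsF : Nat → Nat → List Char
  | 0, m => [if m = 1 then '1' else '0']
  | fuel+1, m =>
    if m ≤ 1 then [if m = 1 then '1' else '0']
    else binCharsF fuel (m / 2) ++ [if m % 2 = 1 then '1' else '0']

def binChars (m : Nat) : List Char := binCharsF m m

-- fuel is only a totality guard (every recursive call is on a strictly shorter list)
def validTreeF : Nat → List Char → Bool
  | 0, _ => true
  | fuel+1, s =>
    if s.length ≤ 1 then true
    else
      let mid := s.length / 2
      if s.getD mid ' ' = '1' then validTreeF fuel (s.take mid) && validTreeF fuel (s.drop (mid + 1))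
      else !(s.contains '1')

def validTree (s : List Char) : Bool := validTreeF s.length s

def checkNumber (number : Int) : Bool :=
  let bits := binChars number.toNat
  let size := 2 ^ PySem.Int.bitLength (bits.length : Int) - 1
  validTree (List.replicate (size - bits.length) '0' ++ bits)

def solution_alt (numbers : List Int) : List Int :=
  numbers.map (fun n => if checkNumber n then 1 else 0)

-- ===== PRECONDITION & SPEC =====
-- Pre_ excludes lists containing a number ≤ 0: on those A's first while-loop never terminates
-- (Python diverges), so A returns on exactly the inputs Pre_ admits.
def Pre_solution (numbers : List Int) : Prop := ∀ n ∈ numbers, 1 ≤ n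
instance (numbers : List Int) : Decidable (Pre_solution numbers) := by unfold Pre_solution; infer_instance

def pvWitness_solution : List Int := [1, 2, 5, 7, 100]

def Spec_solution (numbers : List Int) (out : List Int) : Prop := out = solution_alt numbers
instance (numbers : List Int) (out : List Int) : Decidable (Spec_solution numbers out) := by unfold Spec_solution; infer_instance

-- ===== CLAIM (what is proved, stated in full; the proofs are below) =====
def Claim_equal_solution : Prop := ∀ (numbers : List Int), Dom_solution numbers → Pre_solution numbers → Spec_solution numbers (solution numbers)

-- ===== LEMMAS AND PROOFS =====

-- fuel irrelevance for binCharsF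
theorem binCharsF_congr : ∀ (f f' m : Nat), m ≤ f → m ≤ f' → binCharsF f m = binCharsF f' m := by
  intro f
  induction f with
  | zero => intro f' m h h'; interval_cases m <;> cases f' <;> simp [binCharsF]
  | succ f ih =>
    intro f' m h h'
    by_cases hm : m ≤ 1
    · interval_cases m <;> cases f' <;> simp [binCharsF]
    · cases f' with
      | zero => omega
      | succ f' =>
        simp only [binCharsF, if_neg hm]
        rw [ih f' (m/2) (by omega) (by omega)]

theorem binChars_step (m : Nat) (hm : 2 ≤ m) :
    binChars m = binChars (m / 2) ++ [if m % 2 = 1 then '1' else '0'] := by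
  unfold binChars
  cases m with
  | zero => omega
  | succ m' =>
    simp only [binCharsF, if_neg (by omega : ¬ m' + 1 ≤ 1)]
    rw [binCharsF_congr m' ((m'+1)/2) ((m'+1)/2) (by omega) le_rfl]

theorem binChars_ne_nil (m : Nat) : binChars m ≠ [] := by
  unfold binChars
  cases m <;> simp [binCharsF] <;> split <;> simp

theorem mbLoop_join : ∀ (fuel : Nat) (n : Int) (acc : List String), 1 ≤ n → n.natAbs ≤ fuel →
    (((mbLoop fuel n acc ++ ["1"]).reverse).map String.toList).flatten
      = binChars n.toNat ++ (((acc).reverse).map String.toList).flatten := by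
  intro fuel
  induction fuel with
  | zero => intro n acc h1 h2; omega
  | succ fuel ih =>
    intro n acc h1 h2
    by_cases hn : n = 1
    · subst hn
      simp [mbLoop, binChars, binCharsF]
    · have h2' : 2 ≤ n := by omega
      simp only [mbLoop, if_pos hn]
      have hfd : PySem.Int.floordiv n 2 = n / 2 := PySem.Int.floordiv_eq_ediv_of_pos (by omega)
      have hge : 1 ≤ n / 2 := by omega
      have hna : (n / 2).natAbs ≤ fuel := by omega
      rw [hfd, ih _ _ hge hna]
      have hmodc : PySem.Int.mod n 2 = ((n.toNat % 2 : Nat) : Int) := by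
        rw [PySem.Int.mod_eq_emod_of_pos (by omega)]
        omega
      have htn : (n / 2).toNat = n.toNat / 2 := by omega
      rw [hmodc, htn, binChars_step n.toNat (by omega)]
      have hbit : (PySem.Int.toStr ((n.toNat % 2 : Nat) : Int)).toList
          = [if n.toNat % 2 = 1 then '1' else '0'] := by
        rcases Nat.mod_two_eq_zero_or_one n.toNat with h | h <;> rw [h] <;> decide
      have hrev : (acc ++ [PySem.Int.toStr ((n.toNat % 2 : Nat) : Int)]).reverse
          = PySem.Int.toStr ((n.toNat % 2 : Nat) : Int) :: acc.reverse := by simp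
      rw [hrev]
      simp only [List.map_cons, List.flatten_cons]
      rw [hbit]
      simp [List.append_assoc]

theorem binChars_binary : ∀ (f m : Nat), ∀ c ∈ binCharsF f m, c = '0' ∨ c = '1' := by
  intro f
  induction f with
  | zero => intro m c hc; simp [binCharsF] at hc; split at hc <;> simp_all
  | succ f ih =>
    intro m c hc
    simp only [binCharsF] at hc
    split at hc
    · split at hc <;> simp_all
    · simp only [List.mem_append, List.mem_singleton] at hc
      rcases hc with hc | hc
      · exact ih _ c hc
      · subst hc; split <;> simp

theorem two_pow_le_iff_lt_bitLength (j L : Nat) (hL : 1 ≤ L) :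
    2 ^ j ≤ L ↔ j < PySem.Int.bitLength (L : Int) := by
  set B := PySem.Int.bitLength (L : Int) with hB
  have hlt : L < 2 ^ B := by
    have := PySem.Int.lt_two_pow_bitLength (L : Int)
    simpa using this
  have hle : 2 ^ (B - 1) ≤ L := by
    have := PySem.Int.two_pow_bitLength_le (L : Int) (by exact_mod_cast (by omega : (L:Int) ≠ 0))
    simpa using this
  constructor
  · intro h
    by_contra hj
    have : 2 ^ B ≤ 2 ^ j := Nat.pow_le_pow_right (by norm_num) (by omega)
    omega
  · intro h
    calc 2 ^ j ≤ 2 ^ (B - 1) := Nat.pow_le_pow_right (by norm_num) (by omega)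
    _ ≤ L := hle

theorem padLoop_eq : ∀ (fuel j L : Nat), 1 ≤ L → j ≤ PySem.Int.bitLength (L : Int) →
    PySem.Int.bitLength (L : Int) ≤ j + fuel →
    padLoop fuel (((2 ^ j - 1 : Nat) : Int)) (L : Int) = ((2 ^ PySem.Int.bitLength (L : Int) - 1 : Nat) : Int) := by
  intro fuel
  induction fuel with
  | zero =>
    intro j L hL hj hf
    have : j = PySem.Int.bitLength (L : Int) := by omega
    subst this; simp [padLoop]
  | succ fuel ih =>
    intro j L hL hj hf
    have hpow : 1 ≤ 2 ^ j := Nat.one_le_two_pow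
    by_cases hlt : ((2 ^ j - 1 : Nat) : Int) < (L : Int)
    · have h2 : 2 ^ j ≤ L := by omega
      have hjB : j < PySem.Int.bitLength (L : Int) := (two_pow_le_iff_lt_bitLength j L hL).1 h2
      simp only [padLoop, if_pos hlt]
      have harith : (((2 ^ j - 1 : Nat) : Int) + 1) * 2 - 1 = ((2 ^ (j+1) - 1 : Nat) : Int) := by
        have hq : (2:Nat) ^ (j+1) = 2 * 2 ^ j := by ring
        rw [hq]
        omega
      rw [harith, ih (j+1) L hL (by omega) (by omega)]
    · have h2 : ¬ 2 ^ j ≤ L := by omega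
      have hjB : j = PySem.Int.bitLength (L : Int) := by
        have := (two_pow_le_iff_lt_bitLength j L hL).2
        omega
      simp only [padLoop, if_neg hlt]
      rw [hjB]

theorem bitLength_le_self (L : Nat) (hL : 1 ≤ L) : PySem.Int.bitLength (L : Int) ≤ L := by
  set B := PySem.Int.bitLength (L : Int) with hB
  have hle : 2 ^ (B - 1) ≤ L := by
    have := PySem.Int.two_pow_bitLength_le (L : Int) (by exact_mod_cast (by omega : (L:Int) ≠ 0))
    simpa using this
  have := Nat.lt_two_pow_self (n := B - 1)
  omega

theorem bitLength_pos (L : Nat) (hL : 1 ≤ L) : 1 ≤ PySem.Int.bitLength (L : Int) := by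
  have := (two_pow_le_iff_lt_bitLength 0 L hL).1 (by simpa using hL)
  omega

theorem padLoop_one (fuel L : Nat) (hL : 1 ≤ L)
    (hf : PySem.Int.bitLength (L : Int) ≤ 1 + fuel) :
    padLoop fuel 1 (L : Int) = (2 : Int) ^ PySem.Int.bitLength (L : Int) - 1 := by
  have h := padLoop_eq fuel 1 L hL (bitLength_pos L hL) hf
  norm_num at h
  exact h

theorem makeBinaryNumber_eq (n : Int) (hn : 1 ≤ n) :
    makeBinaryNumber n =
      List.replicate (2 ^ PySem.Int.bitLength ((binChars n.toNat).length : Int) - 1 - (binChars n.toNat).length) '0'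
        ++ binChars n.toNat := by
  have hL1 : 1 ≤ (binChars n.toNat).length := List.length_pos_of_ne_nil (binChars_ne_nil n.toNat)
  have hB1 : 1 ≤ PySem.Int.bitLength ((binChars n.toNat).length : Int) := bitLength_pos _ hL1
  have hBle : PySem.Int.bitLength ((binChars n.toNat).length : Int) ≤ 1 + ((binChars n.toNat).length + 1) := by
    have := bitLength_le_self _ hL1
    omega
  have h2L : (binChars n.toNat).length ≤ 2 ^ PySem.Int.bitLength ((binChars n.toNat).length : Int) - 1 := by
    have h : ¬ 2 ^ PySem.Int.bitLength ((binChars n.toNat).length : Int) ≤ (binChars n.toNat).length :=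
      fun hle => lt_irrefl _ ((two_pow_le_iff_lt_bitLength _ _ hL1).1 hle)
    have hp := Nat.one_le_two_pow (n := PySem.Int.bitLength ((binChars n.toNat).length : Int))
    omega
  simp only [makeBinaryNumber]
  rw [PySem.List.slice?_none_none_neg_one]
  simp only [Option.getD_some]
  have hjoin := mbLoop_join (n.natAbs + 1) n [] hn (by omega)
  simp only [List.reverse_nil, List.map_nil, List.flatten_nil, List.append_nil] at hjoin
  rw [hjoin]
  rw [padLoop_one _ _ hL1 (by omega)]
  have hc : ((2:Int) ^ PySem.Int.bitLength ((binChars n.toNat).length : Int))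
      = ((2 ^ PySem.Int.bitLength ((binChars n.toNat).length : Int) : Nat) : Int) := by
    push_cast
    ring
  congr 1
  congr 1
  rw [hc]
  omega

theorem validTreeF_congr : ∀ (f f' : Nat) (s : List Char), s.length ≤ f → s.length ≤ f' →
    validTreeF f s = validTreeF f' s := by
  intro f
  induction f with
  | zero =>
    intro f' s h h'
    have : s.length = 0 := by omega
    cases f' with
    | zero => rfl
    | succ f' => simp [validTreeF, if_pos (by omega : s.length ≤ 1)]
  | succ f ih =>
    intro f' s h h'
    by_cases h1 : s.length ≤ 1
    · cases f' with
      | zero =>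
        have : s.length = 0 := by omega
        simp [validTreeF, if_pos h1]
      | succ f' => simp [validTreeF, if_pos h1]
    · cases f' with
      | zero => omega
      | succ f' =>
        simp only [validTreeF, if_neg h1]
        rw [ih f' (s.take (s.length / 2)) (by simp; omega) (by simp; omega),
            ih f' (s.drop (s.length / 2 + 1)) (by simp; omega) (by simp; omega)]

theorem validTree_node (s : List Char) (h2 : 2 ≤ s.length) :
    validTree s = if s.getD (s.length / 2) ' ' = '1'
                  then validTree (s.take (s.length / 2)) && validTree (s.drop (s.length / 2 + 1))
                  else !(s.contains '1') := by
  unfold validTree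
  obtain ⟨f, hf⟩ : ∃ f, s.length = f + 1 := ⟨s.length - 1, by omega⟩
  conv_lhs => rw [hf]
  simp only [validTreeF, if_neg (by omega : ¬ s.length ≤ 1)]
  rw [validTreeF_congr f (s.take (s.length / 2)).length _ (by simp; omega) le_rfl,
      validTreeF_congr f (s.drop (s.length / 2 + 1)).length _ (by simp; omega) le_rfl]

theorem validTreeF_false_contains : ∀ (f : Nat) (s : List Char),
    validTreeF f s = false → '1' ∈ s := by
  intro f
  induction f with
  | zero => intro s h; simp [validTreeF] at h
  | succ f ih =>
    intro s h
    simp only [validTreeF] at h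
    split at h
    · simp at h
    · split at h
      · rcases Bool.and_eq_false_iff.1 h with h' | h'
        · exact List.mem_of_mem_take (ih _ h')
        · exact List.mem_of_mem_drop (ih _ h')
      · simp at h
        exact h

theorem validTree_false_contains (s : List Char) (h : validTree s = false) : '1' ∈ s :=
  validTreeF_false_contains _ s h

theorem pow_cast (j : Nat) : ((2:Int) ^ j) = ((2 ^ j : Nat) : Int) := by push_cast; ring

theorem cp_eq : ∀ (k : Nat), 1 ≤ k → ∀ (fuel start : Nat) (s : List Char),
    (∀ c ∈ s, c = '0' ∨ c = '1') → k + 1 ≤ fuel → start + 2 ^ k - 1 ≤ s.length →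
    cp fuel (start : Int) ((start : Int) + 2 ^ k - 2) s =
      (if validTree ((s.drop start).take (2 ^ k - 1))
       then (if ((s.drop start).take (2 ^ k - 1)).contains '1' then some '1' else some '0')
       else none) := by
  intro k hk
  induction k, hk using Nat.le_induction with
  | base =>
    intro fuel start s hb hfuel hlen
    obtain ⟨f, rfl⟩ : ∃ f, fuel = f + 1 := ⟨fuel - 1, by omega⟩
    have hlt : start < s.length := by simp at hlen; omega
    simp only [cp, pow_one, if_pos (by ring : (start : Int) = (start : Int) + 2 - 2)]
    rw [PySem.List.pyGet?_natCast]
    rw [List.getElem?_eq_getElem hlt]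
    have hdrop : s.drop start = s[start] :: s.drop (start + 1) := List.drop_eq_getElem_cons hlt
    have htake : (s.drop start).take 1 = [s[start]] := by
      rw [hdrop, List.take_succ_cons, List.take_zero]
    norm_num [htake]
    have hone : validTree [s[start]] = true := by simp [validTree, validTreeF]
    rw [hone]
    rcases hb s[start] (List.getElem_mem hlt) with hc | hc <;> rw [hc] <;> simp
  | succ k hk ih =>
    intro fuel start s hb hfuel hlen
    obtain ⟨f, rfl⟩ : ∃ f, fuel = f + 1 := ⟨fuel - 1, by omega⟩
    have hN2 : 2 ≤ 2 ^ k := by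
      calc 2 = 2 ^ 1 := by norm_num
      _ ≤ 2 ^ k := Nat.pow_le_pow_right (by norm_num) hk
    have hpowN : (2:Nat) ^ (k+1) = 2 * 2 ^ k := by ring
    have hlen' : start + 2 * 2 ^ k - 1 ≤ s.length := by omega
    have hpowI : (2:Int) ^ (k+1) = 2 * 2 ^ k := by ring
    have hpc := pow_cast k
    have hne : ¬ ((start : Int) = (start : Int) + 2 ^ (k+1) - 2) := by
      rw [hpowI, hpc]
      omega
    simp only [cp, if_neg hne]
    have hmid : PySem.Int.floordiv ((start : Int) + ((start : Int) + 2 ^ (k+1) - 2)) 2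
        = (start : Int) + 2 ^ k - 1 := by
      rw [PySem.Int.floordiv_eq_iff_of_pos (by norm_num)]
      rw [hpowI]
      constructor <;> ring_nf <;> omega
    rw [hmid]
    have e1 : ((start : Int) + 2 ^ k - 1) - 1 = (start : Int) + 2 ^ k - 2 := by ring
    have e2 : ((start : Int) + 2 ^ k - 1) + 1 = ((start + 2 ^ k : Nat) : Int) := by
      push_cast
      ring
    have e3 : (start : Int) + 2 ^ (k+1) - 2 = ((start + 2 ^ k : Nat) : Int) + 2 ^ k - 2 := by
      push_cast [pow_succ]
      ring
    have hidx : start + 2 ^ k - 1 < s.length := by omega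
    have hget : PySem.List.pyGet? s ((start : Int) + 2 ^ k - 1)
        = some (s[start + 2 ^ k - 1]'hidx) := by
      have hc2 : (start : Int) + 2 ^ k - 1 = ((start + 2 ^ k - 1 : Nat) : Int) := by
        rw [hpc]
        omega
      rw [hc2, PySem.List.pyGet?_natCast, List.getElem?_eq_getElem hidx]
    rw [e1, e2, e3, hget]
    rw [ih f start s hb (by omega) (by omega),
        ih f (start + 2 ^ k) s hb (by omega) (by omega)]
    have hsegLen : (List.take (2 ^ (k+1) - 1) (List.drop start s)).length = 2 * 2 ^ k - 1 := by
      simp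
      omega
    have hidxseg : 2 ^ k - 1 < (List.take (2 ^ (k+1) - 1) (List.drop start s)).length := by
      rw [hsegLen]
      omega
    have hsegtake : (List.take (2 ^ (k+1) - 1) (List.drop start s)).take (2 ^ k - 1)
        = List.take (2 ^ k - 1) (List.drop start s) := by
      rw [List.take_take]
      congr 1
      omega
    have hsegdrop : (List.take (2 ^ (k+1) - 1) (List.drop start s)).drop (2 ^ k)
        = List.take (2 ^ k - 1) (List.drop (start + 2 ^ k) s) := by
      rw [List.drop_take, List.drop_drop]
      congr 1 <;> omega
    have hsegget : (List.take (2 ^ (k+1) - 1) (List.drop start s))[2 ^ k - 1]'hidxseg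
        = s[start + 2 ^ k - 1]'hidx := by
      rw [List.getElem_take, List.getElem_drop]
      exact getElem_congr rfl (by omega) (by omega)
    have hdecomp : List.take (2 ^ (k+1) - 1) (List.drop start s)
        = List.take (2 ^ k - 1) (List.drop start s)
            ++ (s[start + 2 ^ k - 1]'hidx) :: List.take (2 ^ k - 1) (List.drop (start + 2 ^ k) s) := by
      conv_lhs => rw [← List.take_append_drop (2 ^ k - 1) (List.take (2 ^ (k+1) - 1) (List.drop start s))]
      rw [hsegtake, List.drop_eq_getElem_cons hidxseg, hsegget,
          show (2 ^ k - 1) + 1 = 2 ^ k from by omega, hsegdrop]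
    have hvalid : validTree (List.take (2 ^ (k+1) - 1) (List.drop start s))
        = if (s[start + 2 ^ k - 1]'hidx) = '1'
          then validTree (List.take (2 ^ k - 1) (List.drop start s))
                && validTree (List.take (2 ^ k - 1) (List.drop (start + 2 ^ k) s))
          else !((List.take (2 ^ (k+1) - 1) (List.drop start s)).contains '1') := by
      rw [validTree_node _ (by rw [hsegLen]; omega), hsegLen,
          show (2 * 2 ^ k - 1) / 2 = 2 ^ k - 1 from by omega,
          List.getD_eq_getElem _ ' ' hidxseg, hsegget, hsegtake,
          show (2 ^ k - 1) + 1 = 2 ^ k from by omega, hsegdrop]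
    rcases hb _ (List.getElem_mem hidx) with hc | hc
    · -- mid character is '0'
      rw [hvalid, hc]
      by_cases hvL : validTree (List.take (2 ^ k - 1) (List.drop start s)) = true
      · by_cases hmL : '1' ∈ List.take (2 ^ k - 1) (List.drop start s)
        · simp [hvL, hmL, hdecomp, hc]
        · by_cases hvR : validTree (List.take (2 ^ k - 1) (List.drop (start + 2 ^ k) s)) = true
          · by_cases hmR : '1' ∈ List.take (2 ^ k - 1) (List.drop (start + 2 ^ k) s)
            · simp [hvL, hmL, hvR, hmR, hdecomp, hc]
            · simp [hvL, hmL, hvR, hmR, hdecomp, hc]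
          · have hvR' : validTree (List.take (2 ^ k - 1) (List.drop (start + 2 ^ k) s)) = false := by
              revert hvR
              cases validTree (List.take (2 ^ k - 1) (List.drop (start + 2 ^ k) s)) <;> simp
            have h1R : '1' ∈ List.take (2 ^ k - 1) (List.drop (start + 2 ^ k) s) :=
              validTree_false_contains _ hvR'
            simp [hvL, hmL, hvR', h1R, hdecomp, hc]
      · have hvL' : validTree (List.take (2 ^ k - 1) (List.drop start s)) = false := by
          revert hvL
          cases validTree (List.take (2 ^ k - 1) (List.drop start s)) <;> simp
        have h1L : '1' ∈ List.take (2 ^ k - 1) (List.drop start s) :=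
          validTree_false_contains _ hvL'
        simp [hvL', h1L, hdecomp, hc]
    · -- mid character is '1'
      rw [hvalid, hc]
      by_cases hvL : validTree (List.take (2 ^ k - 1) (List.drop start s)) = true
      · by_cases hvR : validTree (List.take (2 ^ k - 1) (List.drop (start + 2 ^ k) s)) = true
        · by_cases hmL : '1' ∈ List.take (2 ^ k - 1) (List.drop start s) <;>
            by_cases hmR : '1' ∈ List.take (2 ^ k - 1) (List.drop (start + 2 ^ k) s) <;>
            simp [hvL, hvR, hmL, hmR, hdecomp, hc]
        · have hvR' : validTree (List.take (2 ^ k - 1) (List.drop (start + 2 ^ k) s)) = false := by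
            revert hvR
            cases validTree (List.take (2 ^ k - 1) (List.drop (start + 2 ^ k) s)) <;> simp
          by_cases hmL : '1' ∈ List.take (2 ^ k - 1) (List.drop start s) <;>
            simp [hvL, hvR', hmL]
      · have hvL' : validTree (List.take (2 ^ k - 1) (List.drop start s)) = false := by
          revert hvL
          cases validTree (List.take (2 ^ k - 1) (List.drop start s)) <;> simp
        simp [hvL']

theorem mb_binary (n : Int) (hn : 1 ≤ n) : ∀ c ∈ makeBinaryNumber n, c = '0' ∨ c = '1' := by
  rw [makeBinaryNumber_eq n hn]
  intro c hc
  rcases List.mem_append.1 hc with h | h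
  · left
    exact List.eq_of_mem_replicate h
  · exact binChars_binary _ _ c h

theorem mb_length (n : Int) (hn : 1 ≤ n) :
    (makeBinaryNumber n).length = 2 ^ PySem.Int.bitLength ((binChars n.toNat).length : Int) - 1 := by
  rw [makeBinaryNumber_eq n hn]
  have hL1 : 1 ≤ (binChars n.toNat).length := List.length_pos_of_ne_nil (binChars_ne_nil n.toNat)
  have h2L : (binChars n.toNat).length ≤ 2 ^ PySem.Int.bitLength ((binChars n.toNat).length : Int) - 1 := by
    have h : ¬ 2 ^ PySem.Int.bitLength ((binChars n.toNat).length : Int) ≤ (binChars n.toNat).length :=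
      fun hle => lt_irrefl _ ((two_pow_le_iff_lt_bitLength _ _ hL1).1 hle)
    have hp := Nat.one_le_two_pow (n := PySem.Int.bitLength ((binChars n.toNat).length : Int))
    omega
  simp
  omega

theorem element_eq (n : Int) (hn : 1 ≤ n) :
    (if (cp ((makeBinaryNumber n).length + 1) 0 (((makeBinaryNumber n).length : Int) - 1)
          (makeBinaryNumber n)).isSome then (1:Int) else 0)
      = (if checkNumber n then 1 else 0) := by
  have hL1 : 1 ≤ (binChars n.toNat).length := List.length_pos_of_ne_nil (binChars_ne_nil n.toNat)
  have hB1 : 1 ≤ PySem.Int.bitLength ((binChars n.toNat).length : Int) := bitLength_pos _ hL1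
  have hBpow : PySem.Int.bitLength ((binChars n.toNat).length : Int)
      < 2 ^ PySem.Int.bitLength ((binChars n.toNat).length : Int) := Nat.lt_two_pow_self
  have hlen := mb_length n hn
  have hfuel : (makeBinaryNumber n).length + 1 = 2 ^ PySem.Int.bitLength ((binChars n.toNat).length : Int) := by
    have hp := Nat.one_le_two_pow (n := PySem.Int.bitLength ((binChars n.toNat).length : Int))
    omega
  have harg0 : (0 : Int) = ((0 : Nat) : Int) := by norm_num
  have harg : ((makeBinaryNumber n).length : Int) - 1
      = ((0 : Nat) : Int) + 2 ^ PySem.Int.bitLength ((binChars n.toNat).length : Int) - 2 := by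
    rw [hlen, pow_cast]
    have hp := Nat.one_le_two_pow (n := PySem.Int.bitLength ((binChars n.toNat).length : Int))
    omega
  rw [harg, harg0,
      cp_eq _ hB1 _ 0 _ (mb_binary n hn) (by omega) (by simp [hlen])]
  have hseg : (List.take (2 ^ PySem.Int.bitLength ((binChars n.toNat).length : Int) - 1)
      (List.drop 0 (makeBinaryNumber n))) = makeBinaryNumber n := by
    rw [List.drop_zero]
    exact List.take_of_length_le (le_of_eq hlen)
  rw [hseg]
  have hcheck : checkNumber n = validTree (makeBinaryNumber n) := by
    rw [makeBinaryNumber_eq n hn]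
    rfl
  rw [hcheck]
  by_cases hv : validTree (makeBinaryNumber n) = true
  · rw [if_pos hv, if_pos hv]
    by_cases hm : '1' ∈ makeBinaryNumber n <;> simp [hm]
  · have hv' : validTree (makeBinaryNumber n) = false := by
      revert hv
      cases validTree (makeBinaryNumber n) <;> simp
    simp [hv']

-- ===== VERDICT (by name: the statement is the Claim_ definition above) =====
theorem solution_spec : Claim_equal_solution := by
  unfold Claim_equal_solution
  intro numbers _ hpre
  unfold Spec_solution solution solution_alt
  rw [PySem.List.foldl_append_singleton_eq_map]
  exact List.map_congr_left (fun n hn => element_eq n (hpre n hn))
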